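-- pv_equiv track=rewrite | github.com/Scope0204/Programmers_Practice | coding_test_backjoon/6_3085.py | check
-- ===== SOURCE A (Python) =====
-- def check(candy):
--     n = len(candy)
--     answer = 1 # 최소 한개이상이니깐
--     for i in range(n):
--         # row 조사
--         count = 1
--         for j in range(1,n):
--             if candy[i][j] == candy[i][j-1] : #이전 값과 같다면
--                 count +=1
--             else: # 이전 값과 다르면
--                 count = 1 # 초기화
--             if count > answer:
--                 answer = count
--
--         # col조사
--         count = 1
--         for j in range(1,n):
--             if candy[j][i] == candy[j-1][i]:
--                 count += 1
--             else:
--                 count =1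
--             if count > answer:
--                 answer = count
--     # 둘 다 조사해서 가장 긴 answer 값 리턴
--     return answer
-- ===== SOURCE B (Python) =====
-- def check(candy):
--     n = len(candy)
--     grid = [row[:n] for row in candy]
--     lines = grid + [list(c) for c in zip(*grid)]
--     best = 1
--     for line in lines:
--         # positions where the value changes, plus both ends: the longest run of
--         # equal values is the largest gap between consecutive cut positions
--         cuts = [0] + [k for k in range(1, n) if line[k] != line[k - 1]] + [n]
--         for p, q in zip(cuts, cuts[1:]):
--             best = max(best, q - p)
--     return best
-- ===== Notes on version B (the rewrite author's own statement) =====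
-- stated objective: alternative
-- what changed: Instead of A's running run-length counter inside interleaved row/column index loops, B computes for each line (rows plus transposed columns) the list of cut positions where the value changes and takes the maximum gap between consecutive cuts.
import Mathlib
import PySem

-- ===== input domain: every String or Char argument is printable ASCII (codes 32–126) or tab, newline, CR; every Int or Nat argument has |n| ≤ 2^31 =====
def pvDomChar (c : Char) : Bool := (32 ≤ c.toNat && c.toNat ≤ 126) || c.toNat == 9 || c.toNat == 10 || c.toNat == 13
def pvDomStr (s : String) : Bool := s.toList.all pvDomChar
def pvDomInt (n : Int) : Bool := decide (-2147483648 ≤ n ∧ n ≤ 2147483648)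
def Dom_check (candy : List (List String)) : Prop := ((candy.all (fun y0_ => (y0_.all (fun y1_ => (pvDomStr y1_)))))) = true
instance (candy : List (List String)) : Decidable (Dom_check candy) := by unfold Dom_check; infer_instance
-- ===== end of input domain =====

-- B drops A's running run-length counter entirely: for every line (rows plus transposed
-- columns) it collects the cut positions where the value changes and takes the largest
-- gap between consecutive cuts; objective: alternative.

-- ===== PORT A =====
-- literal transliteration of A: answer accumulator, for each i a row pass and a column
-- pass, each an index loop over range(1, n) carrying (count, answer).
def check (candy : List (List String)) : Int :=
  let n : Int := candy.length
  (PySem.List.pyRange 0 n 1).foldl (fun answer i =>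
    let s1 := (PySem.List.pyRange 1 n 1).foldl (fun (s : Int × Int) j =>
      let count := if PySem.List.pyGetD (PySem.List.pyGetD candy i []) j "" ==
                      PySem.List.pyGetD (PySem.List.pyGetD candy i []) (j - 1) ""
                   then s.1 + 1 else 1
      (count, if count > s.2 then count else s.2)) (1, answer)
    ((PySem.List.pyRange 1 n 1).foldl (fun (s : Int × Int) j =>
      let count := if PySem.List.pyGetD (PySem.List.pyGetD candy j []) i "" ==
                      PySem.List.pyGetD (PySem.List.pyGetD candy (j - 1) []) i ""
                   then s.1 + 1 else 1
      (count, if count > s.2 then count else s.2)) (1, s1.2)).2) 1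

-- ===== PORT B =====
-- Python's zip(*rows): columns until the shortest row runs out.  The fuel argument only
-- makes the recursion structural; the first row's length always suffices.
def zipStarFuel : Nat → List (List String) → List (List String)
  | 0, _ => []
  | fuel + 1, rows =>
    if rows.isEmpty || rows.any List.isEmpty then []
    else rows.map (fun r => r.headD "") :: zipStarFuel fuel (rows.map List.tail)

def zipStar (rows : List (List String)) : List (List String) :=
  zipStarFuel (rows.headD []).length rows

-- B's inner loops for one line: cuts = [0] + change positions + [n], then the
-- max gap between consecutive cuts folded into best
def cutMaxInto (best : Int) (n : Int) (line : List String) : Int :=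
  let cuts : List Int := (0 :: (PySem.List.pyRange 1 n 1).filter
    (fun k => !(PySem.List.pyGetD line k "" == PySem.List.pyGetD line (k - 1) ""))) ++ [n]
  (cuts.zip cuts.tail).foldl (fun b p => max b (p.2 - p.1)) best

def check_alt (candy : List (List String)) : Int :=
  let n : Int := candy.length
  let grid := candy.map (fun row => PySem.List.slice row none (some n))
  let lines := grid ++ zipStar grid
  lines.foldl (fun best line => cutMaxInto best n line) 1

-- ===== PRECONDITION & SPEC =====
-- Pre_ excludes exactly the inputs on which A raises IndexError: at least two rows and
-- some row shorter than the number of rows n (A then reads candy[i][j] past a row's end).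
def Pre_check (candy : List (List String)) : Prop :=
  candy.length ≤ 1 ∨ ∀ row ∈ candy, candy.length ≤ row.length
instance (candy : List (List String)) : Decidable (Pre_check candy) := by
  unfold Pre_check; infer_instance
def pvWitness_check : List (List String) := [["a", "b"], ["b", "b"]]

def Spec_check (candy : List (List String)) (out : Int) : Prop := out = check_alt candy
instance (candy : List (List String)) (out : Int) : Decidable (Spec_check candy out) := by
  unfold Spec_check; infer_instance

-- ===== CLAIM (what is proved, stated in full; the proofs are below) =====
def Claim_equal_check : Prop := ∀ (candy : List (List String)),
  Dom_check candy → Pre_check candy → Spec_check candy (check candy)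

-- ===== LEMMAS AND PROOFS =====

-- A's inner-loop step, on an adjacent pair (prev, cur)
def stepA (s : Int × Int) (p : String × String) : Int × Int :=
  let count := if p.2 == p.1 then s.1 + 1 else 1
  (count, if count > s.2 then count else s.2)

-- run-length scan step (proof-internal reference semantics of a line's longest run)
def stepB (s : Int × Int) (p : String × String) : Int × Int :=
  let run := if p.2 == p.1 then s.2 + 1 else 1
  (max s.1 run, run)

def longestRun (line : List String) : Int :=
  ((line.zip line.tail).foldl stepB (1, 1)).1

-- the k-th row of the board A actually scans (truncated to n columns)
def rowL (candy : List (List String)) (k : Nat) : List String :=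
  (candy.getD k []).take candy.length

-- the k-th column of the board
def colL (candy : List (List String)) (k : Nat) : List String :=
  candy.map (fun r => r.getD k "")

-- relation between the two scans: A's answer is the scan's best joined with A's incoming answer
theorem fold_stepA_stepB (ps : List (String × String)) :
    ∀ (a b r : Int),
      ((ps.foldl stepA (r, max a b)).2 = max a (ps.foldl stepB (b, r)).1) ∧
      ((ps.foldl stepA (r, max a b)).1 = (ps.foldl stepB (b, r)).2) := by
  induction ps with
  | nil => intro a b r; exact ⟨rfl, rfl⟩
  | cons p ps ih =>
    intro a b r
    simp only [List.foldl_cons]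
    have hA : stepA (r, max a b) p =
        ((if p.2 == p.1 then r + 1 else 1 : Int),
          max a (max b (if p.2 == p.1 then r + 1 else 1))) := by
      simp only [stepA]
      refine Prod.ext rfl ?_
      generalize (if p.2 == p.1 then r + 1 else 1 : Int) = c
      simp only
      split <;> omega
    have hB : stepB (b, r) p =
        (max b (if p.2 == p.1 then r + 1 else 1 : Int),
          (if p.2 == p.1 then r + 1 else 1 : Int)) := rfl
    rw [hA, hB]
    exact ih a (max b (if p.2 == p.1 then r + 1 else 1)) (if p.2 == p.1 then r + 1 else 1)

theorem foldl_stepA_answer (ps : List (String × String)) (a : Int) (ha : 1 ≤ a) :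
    (ps.foldl stepA (1, a)).2 = max a ((ps.foldl stepB (1, 1)).1) := by
  have h := (fold_stepA_stepB ps a 1 1).1
  have h2 : max a 1 = a := by omega
  rw [h2] at h
  exact h

theorem fst_le_foldl_stepB (ps : List (String × String)) :
    ∀ (s : Int × Int), s.1 ≤ (ps.foldl stepB s).1 := by
  induction ps with
  | nil => intro s; exact le_refl _
  | cons p ps ih =>
    intro s
    simp only [List.foldl_cons]
    exact le_trans (le_max_left _ _) (ih (stepB s p))

theorem one_le_longestRun (l : List String) : 1 ≤ longestRun l :=
  fst_le_foldl_stepB _ (1, 1)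

-- index ranges to adjacent-pair lists
theorem map_pairs (n : Nat) (g : Int → String) (l : List String) (hl : l.length = n)
    (hg : ∀ k : Nat, k < n → g (k : Int) = l.getD k "") :
    (PySem.List.pyRange 1 (n : Int) 1).map (fun j => (g (j - 1), g j)) = l.zip l.tail := by
  rw [PySem.List.pyRange_one]
  have h1 : ((n : Int) - 1).toNat = n - 1 := by omega
  rw [h1, List.map_map]
  apply List.ext_getElem
  · simp [hl]
  · intro k hk1 hk2
    simp only [List.length_map, List.length_range] at hk1
    have hk : k < n - 1 := by simpa using hk1
    have e1 : (1 : Int) + (k : Int) - 1 = (k : Int) := by omega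
    have e2 : (1 : Int) + (k : Int) = ((k + 1 : Nat) : Int) := by omega
    simp only [List.getElem_map, List.getElem_range, Function.comp_apply, List.getElem_zip,
      List.getElem_tail]
    rw [e1, e2, hg k (by omega), hg (k + 1) (by omega),
      List.getD_eq_getElem l "" (by omega), List.getD_eq_getElem l "" (by omega)]

-- max-fold algebra
theorem foldl_max_shift (l : List Int) : ∀ (a b : Int),
    l.foldl max (max a b) = max b (l.foldl max a) := by
  induction l with
  | nil => intro a b; simp only [List.foldl_nil]; exact max_comm a b
  | cons x xs ih =>
    intro a b
    simp only [List.foldl_cons]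
    rw [show max (max a b) x = max (max a x) b by omega, ih]

theorem foldl_interleave (f g : Nat → Int) (ks : List Nat) : ∀ (a : Int),
    ks.foldl (fun a k => max (max a (f k)) (g k)) a
      = (ks.map g).foldl max ((ks.map f).foldl max a) := by
  induction ks with
  | nil => intro a; rfl
  | cons k ks ih =>
    intro a
    simp only [List.foldl_cons, List.map_cons, ih]
    rw [foldl_max_shift (ks.map f) (max a (f k)) (g k), max_comm]

-- getD commutes with take on in-range indices
theorem getD_take (l : List String) (n k : Nat) (hk : k < n) :
    (l.take n).getD k "" = l.getD k "" := by
  simp only [List.getD, List.getElem?_take]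
  simp [hk]

-- zip(*g) on a rectangular non-empty grid is the list of its columns
theorem zipStarFuel_rect (m : Nat) : ∀ (g : List (List String)), g ≠ [] →
    (∀ r ∈ g, r.length = m) →
    zipStarFuel m g = (List.range m).map (fun i => g.map (fun r => r.getD i "")) := by
  induction m with
  | zero => intro g _ _; simp [zipStarFuel]
  | succ m ih =>
    intro g hne hall
    have hempty : (g.isEmpty || g.any List.isEmpty) = false := by
      simp only [Bool.or_eq_false_iff, List.isEmpty_eq_false_iff, List.any_eq_false]
      refine ⟨hne, fun r hr => ?_⟩
      have := hall r hr
      simp [List.isEmpty_iff]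
      intro h; rw [h] at this; simp at this
    rw [zipStarFuel, hempty]
    simp only [Bool.false_eq_true, if_false]
    have hrec := ih (g.map List.tail) (by simpa using hne)
      (by
        intro r hr
        simp only [List.mem_map] at hr
        obtain ⟨r0, hr0, rfl⟩ := hr
        have := hall r0 hr0
        simp [List.length_tail, this])
    rw [hrec, List.range_succ_eq_map]
    simp only [List.map_cons, List.map_map]
    congr 1
    · apply List.map_congr_left
      intro r _
      cases r <;> simp [List.getD]
    · apply List.map_congr_left
      intro i _
      simp only [Function.comp_apply]
      apply List.map_congr_left
      intro r _
      cases r <;> simp [List.getD]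

theorem map_eq_range_map (l : List (List String)) (h : List String → Int) :
    l.map h = (List.range l.length).map (fun k => h (l.getD k [])) := by
  apply List.ext_getElem
  · simp
  · intro k hk1 hk2
    simp only [List.length_map] at hk1
    simp [List.getD, List.getElem?_eq_getElem hk1]

-- fold over a list where the two bodies agree on states ≥ 1
theorem foldl_body_eq {β : Type} (F G : Int → β → Int) (ks : List β)
    (h : ∀ (a : Int) (x : β), 1 ≤ a → x ∈ ks → F a x = G a x ∧ 1 ≤ G a x) :
    ∀ a, 1 ≤ a → ks.foldl F a = ks.foldl G a := by
  induction ks with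
  | nil => intro a _; rfl
  | cons x ks ih =>
    intro a ha
    simp only [List.foldl_cons]
    obtain ⟨he, hg⟩ := h a x ha (by simp)
    rw [he]
    exact ih (fun a y ha hy => h a y ha (by simp [hy])) _ hg

-- A's inner loop, through an access function g for the scanned line l
theorem inner_fold (c : List (List String)) (g : Int → String) (l : List String) (a : Int)
    (ha : 1 ≤ a) (hl : l.length = c.length)
    (hg : ∀ k : Nat, k < c.length → g (k : Int) = l.getD k "") :
    ((PySem.List.pyRange 1 (c.length : Int) 1).foldl (fun (s : Int × Int) j =>
      let count := if g j == g (j - 1) then s.1 + 1 else 1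
      (count, if count > s.2 then count else s.2)) (1, a)).2 = max a (longestRun l) := by
  have h1 : (PySem.List.pyRange 1 (c.length : Int) 1).foldl (fun (s : Int × Int) j =>
      let count := if g j == g (j - 1) then s.1 + 1 else 1
      (count, if count > s.2 then count else s.2)) (1, a)
      = ((PySem.List.pyRange 1 (c.length : Int) 1).map (fun j => (g (j - 1), g j))).foldl
          stepA (1, a) :=
    (List.foldl_map (f := fun j => (g (j - 1), g j)) (g := stepA)
      (l := PySem.List.pyRange 1 (c.length : Int) 1) (init := ((1 : Int), a))).symm
  rw [h1, map_pairs c.length g l hl hg, foldl_stepA_answer _ a ha]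
  rfl

-- ===== B-side: cut positions and gaps =====

def breaksOf (l : List String) : List Int :=
  (PySem.List.pyRange 1 (l.length : Int) 1).filter
    (fun k => !(PySem.List.pyGetD l k "" == PySem.List.pyGetD l (k - 1) ""))

def ptsOf (l : List String) : List Int := (0 :: breaksOf l) ++ [(l.length : Int)]

def cutDiffs (l : List String) : List Int :=
  ((ptsOf l).zip (ptsOf l).tail).map (fun p => p.2 - p.1)

theorem cutMaxInto_unfold (best : Int) (l : List String) :
    cutMaxInto best (l.length : Int) l = (cutDiffs l).foldl max best := by
  simp only [cutMaxInto, cutDiffs, ptsOf, breaksOf, List.foldl_map]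

-- adjacent pairs of l ++ [x]
theorem zip_tail_concat {α : Type} (d : α) : ∀ (l : List α) (x : α), l ≠ [] →
    (l ++ [x]).zip ((l ++ [x]).tail) = l.zip l.tail ++ [(l.getLastD d, x)] := by
  intro l
  induction l with
  | nil => intro x h; exact absurd rfl h
  | cons a t ih =>
    intro x _
    cases t with
    | nil => simp
    | cons b t' =>
      have := ih x (by simp)
      simp only [List.cons_append, List.tail_cons, List.zip_cons_cons] at this ⊢
      rw [this]
      simp

theorem getLastD_eq_getElem (l : List String) (h : l ≠ []) (d : String) :
    l.getLastD d = l[l.length - 1]'(by cases l with | nil => exact absurd rfl h | cons a t => simp) := by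
  rw [List.getLastD_eq_getLast?, List.getLast?_eq_some_getLast h, List.getLast_eq_getElem]
  rfl

theorem breaks_concat (l : List String) (x : String) (h : l ≠ []) :
    breaksOf (l ++ [x]) = breaksOf l ++
      (if x == l.getLastD "" then [] else [(l.length : Int)]) := by
  have hm : 1 ≤ l.length := by cases l with | nil => exact absurd rfl h | cons a t => simp
  have hlen : (((l ++ [x]).length : Nat) : Int) = (l.length : Int) + 1 := by simp
  unfold breaksOf
  rw [hlen, PySem.List.pyRange_one_succ_right (by exact_mod_cast hm), List.filter_append]
  congr 1
  · apply List.filter_congr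
    intro k hk
    rw [PySem.List.mem_pyRange_one] at hk
    have e1 : PySem.List.pyGetD (l ++ [x]) k "" = PySem.List.pyGetD l k "" := by
      rw [PySem.List.pyGetD_eq_getElem _ "" (by omega) (by simp; omega),
          PySem.List.pyGetD_eq_getElem _ "" (by omega) (by omega)]
      exact List.getElem_append_left (by omega)
    have e2 : PySem.List.pyGetD (l ++ [x]) (k - 1) "" = PySem.List.pyGetD l (k - 1) "" := by
      rw [PySem.List.pyGetD_eq_getElem _ "" (by omega) (by simp; omega),
          PySem.List.pyGetD_eq_getElem _ "" (by omega) (by omega)]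
      exact List.getElem_append_left (by omega)
    rw [e1, e2]
  · have e3 : PySem.List.pyGetD (l ++ [x]) (l.length : Int) "" = x := by
      rw [PySem.List.pyGetD_eq_getElem _ "" (by omega) (by simp)]
      simp
    have e4 : PySem.List.pyGetD (l ++ [x]) ((l.length : Int) - 1) "" = l.getLastD "" := by
      rw [PySem.List.pyGetD_eq_getElem _ "" (by omega) (by omega)]
      have ht : ((l.length : Int) - 1).toNat = l.length - 1 := by omega
      simp only [ht]
      rw [getLastD_eq_getElem l h]
      exact List.getElem_append_left (by omega)
    rw [List.filter_singleton]
    simp only [e3, e4]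
    by_cases hx : (x == l.getLastD "") = true
    · rw [hx]; simp
    · rw [Bool.eq_false_iff.mpr hx]; simp

theorem cut_key : ∀ (l : List String), l ≠ [] →
    cutDiffs l ≠ [] ∧ 1 ≤ (cutDiffs l).getLastD 0 ∧
    (l.zip l.tail).foldl stepB (1, 1)
      = ((cutDiffs l).foldl max 1, (cutDiffs l).getLastD 0) := by
  intro l
  induction l using List.reverseRecOn with
  | nil => intro h; exact absurd rfl h
  | append_singleton l x ih =>
    intro _
    by_cases hl : l = []
    · subst hl
      simp only [List.nil_append]
      have hd : cutDiffs [x] = [1] := by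
        simp [cutDiffs, ptsOf, breaksOf, PySem.List.pyRange_one_eq_nil]
      refine ⟨by rw [hd]; simp, by rw [hd]; simp, ?_⟩
      rw [hd]
      simp
    · obtain ⟨hne, hlast, hscan⟩ := ih hl
      have hold : cutDiffs l = (((0 :: breaksOf l)).zip ((0 :: breaksOf l)).tail).map
          (fun p : Int × Int => p.2 - p.1) ++ [(l.length : Int) - (0 :: breaksOf l).getLastD 0] := by
        unfold cutDiffs ptsOf
        rw [zip_tail_concat (0 : Int) (0 :: breaksOf l) (l.length : Int) (by simp),
          List.map_append]
        rfl
      have hpairs := zip_tail_concat "" l x hl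
      have hlen2 : (((l ++ [x]).length : Nat) : Int) = (l.length : Int) + 1 := by simp
      set D := (((0 :: breaksOf l)).zip ((0 :: breaksOf l)).tail).map
          (fun p : Int × Int => p.2 - p.1) with hD
      set g : Int := (0 :: breaksOf l).getLastD 0 with hg
      set m : Int := (l.length : Int) with hm
      by_cases hx : (x == l.getLastD "") = true
      · have hbr : breaksOf (l ++ [x]) = breaksOf l := by
          rw [breaks_concat l x hl, hx]; simp
        have hnew : cutDiffs (l ++ [x]) = D ++ [m + 1 - g] := by
          unfold cutDiffs ptsOf
          rw [hbr, hlen2,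
            zip_tail_concat (0 : Int) (0 :: breaksOf l) (m + 1) (by simp), List.map_append]
          rfl
        have hlast' : 1 ≤ m - g := by rw [hold, List.getLastD_concat] at hlast; exact hlast
        refine ⟨by rw [hnew]; simp, ?_, ?_⟩
        · rw [hnew, List.getLastD_concat]; omega
        · rw [hpairs, List.foldl_append, hscan, hold, hnew,
            List.getLastD_concat, List.getLastD_concat, List.foldl_append, List.foldl_append]
          simp only [List.foldl_cons, List.foldl_nil, stepB, hx, if_true]
          refine Prod.ext ?_ (by omega)
          simp only
          omega
      · have hbr : breaksOf (l ++ [x]) = breaksOf l ++ [m] := by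
          rw [breaks_concat l x hl, Bool.eq_false_iff.mpr hx]; simp; exact hm.symm
        have hnew : cutDiffs (l ++ [x]) = (D ++ [m - g]) ++ [1] := by
          unfold cutDiffs ptsOf
          rw [hbr, hlen2]
          have hsplit : (0 : Int) :: (breaksOf l ++ [m]) = (0 :: breaksOf l) ++ [m] := by simp
          rw [hsplit,
            zip_tail_concat (0 : Int) ((0 :: breaksOf l) ++ [m]) (m + 1) (by simp),
            zip_tail_concat (0 : Int) (0 :: breaksOf l) m (by simp),
            List.getLastD_concat, List.map_append, List.map_append]
          simp [hD, hg, List.getLastD_eq_getLast?]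
        refine ⟨by rw [hnew]; simp, by rw [hnew, List.getLastD_concat], ?_⟩
        rw [hpairs, List.foldl_append, hscan, hnew, List.getLastD_concat]
        simp only [List.foldl_cons, List.foldl_nil, stepB, Bool.eq_false_iff.mpr hx,
          Bool.false_eq_true, if_false]
        refine Prod.ext ?_ rfl
        simp only
        rw [List.foldl_append, hold]
        simp only [List.foldl_cons, List.foldl_nil]

theorem cutMaxInto_line (best : Int) (l : List String) (h : l ≠ []) (hb : 1 ≤ best) :
    cutMaxInto best (l.length : Int) l = max best (longestRun l) := by
  obtain ⟨_, _, hscan⟩ := cut_key l h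
  have hLR : longestRun l = (cutDiffs l).foldl max 1 := by
    unfold longestRun; rw [hscan]
  rw [cutMaxInto_unfold, hLR]
  have hsh := foldl_max_shift (cutDiffs l) 1 best
  have hb' : max 1 best = best := by omega
  rw [hb'] at hsh
  rw [hsh]

-- the single-row board: both programs return 1 whatever the row holds
theorem check_one (r : List String) : check [r] = 1 := by
  have e0 : PySem.List.pyRange 0 1 1 = [0] := by decide
  have e1 : PySem.List.pyRange 1 1 1 = [] := by decide
  simp [check, e0, e1]

theorem check_alt_one (r : List String) : check_alt [r] = 1 := by
  cases r with
  | nil => decide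
  | cons y t =>
    have e1 : PySem.List.pyRange 1 1 1 = [] := by decide
    have hs : PySem.List.slice (y :: t) none (some ((1 : Nat) : Int)) = (y :: t).take 1 :=
      PySem.List.slice_to_natCast (y :: t) 1
    simp only [Nat.cast_one] at hs
    simp [check_alt, zipStar, zipStarFuel, cutMaxInto, e1, hs]

-- ===== VERDICT (by name: the statement is the Claim_ definition above) =====
theorem check_spec : Claim_equal_check := by
  intro candy _ hpre
  unfold Spec_check
  by_cases hsmall : candy.length ≤ 1
  · cases candy with
    | nil => decide
    | cons r rest =>
      cases rest with
      | cons s rest' => simp at hsmall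
      | nil => rw [check_one, check_alt_one]
  · have hrect : ∀ row ∈ candy, candy.length ≤ row.length := hpre.resolve_left hsmall
    have h0 : candy ≠ [] := by intro h; rw [h] at hsmall; simp at hsmall
    have hn1 : 1 ≤ candy.length := by omega
    -- the rows A scans have exactly n columns
    have hlrow : ∀ k : Nat, k < candy.length → (rowL candy k).length = candy.length := by
      intro k hk
      have hmem : candy.getD k [] ∈ candy := by
        rw [List.getD_eq_getElem candy [] hk]
        exact List.getElem_mem hk
      have := hrect _ hmem
      simp only [rowL, List.length_take]
      omega
    -- ===== A-side: check = max-fold over row maxima then column maxima =====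
    have hA : check candy
        = ((List.range candy.length).map (fun k => longestRun (colL candy k))).foldl max
            (((List.range candy.length).map (fun k => longestRun (rowL candy k))).foldl max 1) := by
      simp only [check]
      rw [PySem.List.pyRange_zero_natCast, List.foldl_map,
        ← foldl_interleave (fun k => longestRun (rowL candy k))
          (fun k => longestRun (colL candy k)) (List.range candy.length) 1]
      refine foldl_body_eq _ _ _ ?_ 1 (by omega)
      intro a k ha hk
      have hk' : k < candy.length := List.mem_range.mp hk
      have hrow := inner_fold candy
        (fun j => PySem.List.pyGetD (PySem.List.pyGetD candy (k : Int) []) j "")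
        (rowL candy k) a ha (hlrow k hk')
        (by
          intro k2 hk2
          simp only [PySem.List.pyGetD_natCast, rowL]
          exact (getD_take _ _ _ hk2).symm)
      refine ⟨?_, by have := le_max_left (max a (longestRun (rowL candy k))) (longestRun (colL candy k)); omega⟩
      show ((PySem.List.pyRange 1 (candy.length : Int) 1).foldl (fun (s : Int × Int) j =>
          let count := if PySem.List.pyGetD (PySem.List.pyGetD candy j []) (k : Int) "" ==
                          PySem.List.pyGetD (PySem.List.pyGetD candy (j - 1) []) (k : Int) ""
                       then s.1 + 1 else 1
          (count, if count > s.2 then count else s.2))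
        (1, ((PySem.List.pyRange 1 (candy.length : Int) 1).foldl (fun (s : Int × Int) j =>
          let count := if PySem.List.pyGetD (PySem.List.pyGetD candy (k : Int) []) j "" ==
                          PySem.List.pyGetD (PySem.List.pyGetD candy (k : Int) []) (j - 1) ""
                       then s.1 + 1 else 1
          (count, if count > s.2 then count else s.2)) (1, a)).2)).2
      = max (max a (longestRun (rowL candy k))) (longestRun (colL candy k))
      have hrow' : ((PySem.List.pyRange 1 (candy.length : Int) 1).foldl (fun (s : Int × Int) j =>
          let count := if PySem.List.pyGetD (PySem.List.pyGetD candy (k : Int) []) j "" ==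
                          PySem.List.pyGetD (PySem.List.pyGetD candy (k : Int) []) (j - 1) ""
                       then s.1 + 1 else 1
          (count, if count > s.2 then count else s.2)) (1, a)).2
          = max a (longestRun (rowL candy k)) := hrow
      rw [hrow']
      have hcol := inner_fold candy
        (fun j => PySem.List.pyGetD (PySem.List.pyGetD candy j []) (k : Int) "")
        (colL candy k) (max a (longestRun (rowL candy k)))
        (by have := one_le_longestRun (rowL candy k); omega)
        (by simp [colL])
        (by
          intro k2 hk2
          simp only [PySem.List.pyGetD_natCast, colL, List.getD, List.getElem?_map,
            List.getElem?_eq_getElem hk2]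
          simp)
      have hcol' : ((PySem.List.pyRange 1 (candy.length : Int) 1).foldl (fun (s : Int × Int) j =>
          let count := if PySem.List.pyGetD (PySem.List.pyGetD candy j []) (k : Int) "" ==
                          PySem.List.pyGetD (PySem.List.pyGetD candy (j - 1) []) (k : Int) ""
                       then s.1 + 1 else 1
          (count, if count > s.2 then count else s.2))
          (1, max a (longestRun (rowL candy k)))).2
          = max (max a (longestRun (rowL candy k))) (longestRun (colL candy k)) := hcol
      exact hcol'
    -- ===== B-side =====
    have hgrid : candy.map (fun row => PySem.List.slice row none (some (candy.length : Int)))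
        = candy.map (fun row => row.take candy.length) := by
      apply List.map_congr_left
      intro r _
      exact PySem.List.slice_to_natCast r candy.length
    have hrect' : ∀ r ∈ candy.map (fun row => row.take candy.length), r.length = candy.length := by
      intro r hr
      simp only [List.mem_map] at hr
      obtain ⟨r0, hr0, rfl⟩ := hr
      have := hrect r0 hr0
      simp only [List.length_take]
      omega
    have hrows : (candy.map (fun row => row.take candy.length)).map longestRun
        = (List.range candy.length).map (fun k => longestRun (rowL candy k)) := by
      rw [List.map_map]
      have := map_eq_range_map candy (fun r => longestRun (r.take candy.length))
      simpa [Function.comp, rowL] using this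
    have hne : candy.map (fun row => row.take candy.length) ≠ [] := by
      simpa using h0
    have hzip : zipStar (candy.map (fun row => row.take candy.length))
        = (List.range candy.length).map
            (fun i => (candy.map (fun row => row.take candy.length)).map (fun r => r.getD i "")) := by
      unfold zipStar
      have hhead : ((candy.map (fun row => row.take candy.length)).headD []).length
          = candy.length := by
        cases candy with
        | nil => exact absurd rfl h0
        | cons r rs =>
          have := hrect r (by simp)
          simp only [List.map_cons, List.headD_cons, List.length_take]
          omega
      rw [hhead]
      exact zipStarFuel_rect candy.length _ hne hrect'
    have hcols : (zipStar (candy.map (fun row => row.take candy.length))).map longestRun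
        = (List.range candy.length).map (fun k => longestRun (colL candy k)) := by
      rw [hzip, List.map_map]
      apply List.map_congr_left
      intro i hi
      simp only [Function.comp_apply]
      congr 1
      rw [List.map_map]
      apply List.map_congr_left
      intro r _
      simp only [Function.comp_apply]
      exact getD_take r candy.length i (List.mem_range.mp hi)
    have hlen_line : ∀ line ∈ (candy.map (fun row => row.take candy.length))
        ++ zipStar (candy.map (fun row => row.take candy.length)),
        line.length = candy.length := by
      intro line hl
      rw [List.mem_append] at hl
      cases hl with
      | inl hl => exact hrect' line hl
      | inr hl =>
        rw [hzip] at hl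
        simp only [List.mem_map] at hl
        obtain ⟨i, _, rfl⟩ := hl
        simp
    have hB : check_alt candy
        = ((List.range candy.length).map (fun k => longestRun (colL candy k))).foldl max
            (((List.range candy.length).map (fun k => longestRun (rowL candy k))).foldl max 1) := by
      simp only [check_alt]
      rw [hgrid]
      rw [foldl_body_eq (fun best line => cutMaxInto best (candy.length : Int) line)
        (fun best line => max best (longestRun line)) _ ?_ 1 (by omega)]
      · rw [← List.foldl_map, List.map_append, List.foldl_append, hrows, hcols]
      · intro a line ha hl
        have hlen := hlen_line line hl
        have hnel : line ≠ [] := by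
          intro h
          rw [h] at hlen
          simp at hlen
          omega
        constructor
        · have := cutMaxInto_line a line hnel ha
          rw [hlen] at this
          exact this
        · have := one_le_longestRun line
          show 1 ≤ max a (longestRun line)
          omega
    rw [hA, hB]
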